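-- pv_equiv track=rewrite | github.com/katrinerk/aida-interchange | ldchypotheses.py | determine_pro_and_con_evidence
-- ===== SOURCE A (Python) =====
-- def determine_pro_and_con_evidence(mygraph, mention_hypothesis, mention_graphnodes):
--     # get the set of all hypotheses
--     hypotheses = set()
--     for hr in mention_hypothesis.values():
--         hypotheses.update(hr.keys())
--
--     # hypothesis -> (pro mentions, con mentions)
--     procon_evidence = { }
--
--     for hypothesis in hypotheses:
--         promentions = [ m for m, hr in mention_hypothesis.items() if hypothesis in hr and hr[hypothesis] in ["fully-relevant", "partially-relevant"]]
--         conmentions = [ m for m, hr in mention_hypothesis.items() if hypothesis in hr and hr[hypothesis] == "contradicts"]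
--
--         pro = set()
--         for m in promentions:
--             pro.update(mention_graphnodes.get(m, []))
--         con = set()
--         for m in conmentions:
--             con.update(mention_graphnodes.get(m, []))
--
--         procon_evidence[ hypothesis ] = (pro, con)
--
--     return procon_evidence
-- ===== SOURCE B (Python) =====
-- PRO_RELATIONS = ("fully-relevant", "partially-relevant")
--
-- def determine_pro_and_con_evidence(mygraph, mention_hypothesis, mention_graphnodes):
--     # Single pass over mentions: accumulate pro/con graph-node sets per hypothesis.
--     procon_evidence = {}
--     for mention, hyp_relations in mention_hypothesis.items():
--         nodes = mention_graphnodes.get(mention, [])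
--         for hypothesis, relation in hyp_relations.items():
--             pro, con = procon_evidence.setdefault(hypothesis, (set(), set()))
--             if relation in PRO_RELATIONS:
--                 pro.update(nodes)
--             elif relation == "contradicts":
--                 con.update(nodes)
--     return procon_evidence
-- ===== Notes on version B (the rewrite author's own statement) =====
-- stated objective: faster
-- what changed: A scans the whole mention dict twice per hypothesis; B makes one pass over the mention dict, accumulating the pro/con graph-node sets per hypothesis in a dict keyed by hypothesis. Pre_ only excludes association lists whose inner relation maps repeat a key, which do not encode a Python dict.
import Mathlib
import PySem

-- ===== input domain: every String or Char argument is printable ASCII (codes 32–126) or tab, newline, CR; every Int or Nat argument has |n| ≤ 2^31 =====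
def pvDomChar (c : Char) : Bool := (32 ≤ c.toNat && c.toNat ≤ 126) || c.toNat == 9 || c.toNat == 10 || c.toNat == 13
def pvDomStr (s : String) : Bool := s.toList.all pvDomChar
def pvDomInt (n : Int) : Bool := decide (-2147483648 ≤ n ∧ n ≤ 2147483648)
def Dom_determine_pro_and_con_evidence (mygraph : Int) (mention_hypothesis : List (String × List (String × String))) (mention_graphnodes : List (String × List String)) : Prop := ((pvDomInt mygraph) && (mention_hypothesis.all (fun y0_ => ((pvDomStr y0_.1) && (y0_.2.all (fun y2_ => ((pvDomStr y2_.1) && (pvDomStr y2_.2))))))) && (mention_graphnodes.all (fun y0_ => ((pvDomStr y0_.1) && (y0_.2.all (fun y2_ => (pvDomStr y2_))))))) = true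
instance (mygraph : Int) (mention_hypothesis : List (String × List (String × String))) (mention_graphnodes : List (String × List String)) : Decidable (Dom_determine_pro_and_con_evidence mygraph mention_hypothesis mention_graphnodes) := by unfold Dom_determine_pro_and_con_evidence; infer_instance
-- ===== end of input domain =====

-- B makes a single pass over the mention dict, accumulating pro/con node sets per hypothesis,
-- instead of A's scan of the whole mention dict once per hypothesis.


-- ===== PORT A =====
-- 'r in ["fully-relevant", "partially-relevant"]'
def pvProRel (r : String) : Bool := r == "fully-relevant" || r == "partially-relevant"

def determine_pro_and_con_evidence (mygraph : Int) (mention_hypothesis : List (String × List (String × String))) (mention_graphnodes : List (String × List String)) : List (String × List String × List String) :=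
  -- hypotheses = set(); for hr in mention_hypothesis.values(): hypotheses.update(hr.keys())
  let hypotheses : PySem.Set String :=
    mention_hypothesis.foldl (fun s p => PySem.Set.update s (p.2.map (fun q => q.1))) PySem.Set.empty
  -- for hypothesis in hypotheses: procon_evidence[hypothesis] = (pro, con)
  let procon_evidence : PySem.Dict String (List String × List String) :=
    hypotheses.foldl (fun d hypothesis =>
      -- 'hypothesis in hr and hr[hypothesis] …' : membership + first-match lookup in one match
      let promentions :=
        (mention_hypothesis.filter (fun p =>
          match (PySem.Dict.mk p.2).get? hypothesis with
          | some r => pvProRel r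
          | none => false)).map (fun p => p.1)
      let conmentions :=
        (mention_hypothesis.filter (fun p =>
          match (PySem.Dict.mk p.2).get? hypothesis with
          | some r => r == "contradicts"
          | none => false)).map (fun p => p.1)
      let pro := promentions.foldl
        (fun s m => PySem.Set.update s ((PySem.Dict.mk mention_graphnodes).getD m [])) PySem.Set.empty
      let con := conmentions.foldl
        (fun s m => PySem.Set.update s ((PySem.Dict.mk mention_graphnodes).getD m [])) PySem.Set.empty
      d.insert hypothesis (pro, con)) PySem.Dict.empty
  procon_evidence.items

-- ===== PORT B =====
def determine_pro_and_con_evidence_alt (mygraph : Int) (mention_hypothesis : List (String × List (String × String))) (mention_graphnodes : List (String × List String)) : List (String × List String × List String) :=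
  let procon_evidence : PySem.Dict String (List String × List String) :=
    mention_hypothesis.foldl (fun d p =>
      -- nodes = mention_graphnodes.get(mention, [])
      let nodes := (PySem.Dict.mk mention_graphnodes).getD p.1 []
      -- for hypothesis, relation in hyp_relations.items(): …
      p.2.foldl (fun d q =>
        -- pro, con = procon_evidence.setdefault(hypothesis, (set(), set()))
        let d' := d.setdefault q.1 (PySem.Set.empty, PySem.Set.empty)
        let pc := d'.getD q.1 (PySem.Set.empty, PySem.Set.empty)
        if pvProRel q.2 then d'.insert q.1 (PySem.Set.update pc.1 nodes, pc.2)
        else if q.2 == "contradicts" then d'.insert q.1 (pc.1, PySem.Set.update pc.2 nodes)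
        else d') d) PySem.Dict.empty
  procon_evidence.items

-- ===== PRECONDITION & SPEC =====
-- Pre_ excludes only association lists in which some inner relation map repeats a hypothesis key:
-- such lists do not encode a Python dict (whose keys are unique), so no Python input reaches them;
-- A's first-match lookup and B's traversal of all pairs disagree on those raw lists.
def Pre_determine_pro_and_con_evidence (mygraph : Int) (mention_hypothesis : List (String × List (String × String))) (mention_graphnodes : List (String × List String)) : Prop :=
  ∀ p ∈ mention_hypothesis, (p.2.map Prod.fst).Nodup
instance (mygraph : Int) (mention_hypothesis : List (String × List (String × String))) (mention_graphnodes : List (String × List String)) : Decidable (Pre_determine_pro_and_con_evidence mygraph mention_hypothesis mention_graphnodes) := by unfold Pre_determine_pro_and_con_evidence; infer_instance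

def pvWitness_determine_pro_and_con_evidence : Int × (List (String × List (String × String))) × (List (String × List String)) :=
  (0, [("m1", [("h1", "fully-relevant"), ("h2", "contradicts")]), ("m2", [("h1", "irrelevant")])], [("m1", ["n1", "n2"])])

def Spec_determine_pro_and_con_evidence (mygraph : Int) (mention_hypothesis : List (String × List (String × String))) (mention_graphnodes : List (String × List String)) (out : List (String × List String × List String)) : Prop := out = determine_pro_and_con_evidence_alt mygraph mention_hypothesis mention_graphnodes
instance (mygraph : Int) (mention_hypothesis : List (String × List (String × String))) (mention_graphnodes : List (String × List String)) (out : List (String × List String × List String)) : Decidable (Spec_determine_pro_and_con_evidence mygraph mention_hypothesis mention_graphnodes out) := by unfold Spec_determine_pro_and_con_evidence; infer_instance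

-- ===== CLAIM (what is proved, stated in full; the proofs are below) =====
def Claim_equal_determine_pro_and_con_evidence : Prop := ∀ (mygraph : Int) (mention_hypothesis : List (String × List (String × String))) (mention_graphnodes : List (String × List String)), Dom_determine_pro_and_con_evidence mygraph mention_hypothesis mention_graphnodes → Pre_determine_pro_and_con_evidence mygraph mention_hypothesis mention_graphnodes → Spec_determine_pro_and_con_evidence mygraph mention_hypothesis mention_graphnodes (determine_pro_and_con_evidence mygraph mention_hypothesis mention_graphnodes)

-- ===== LEMMAS AND PROOFS =====

-- the mention dict flattened to (mention, hypothesis, relation) triples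
def pvTrips (mh : List (String × List (String × String))) : List (String × String × String) :=
  mh.flatMap (fun p => p.2.map (fun q => (p.1, q.1, q.2)))

def pvNodes (mg : List (String × List String)) (m : String) : List String :=
  (PySem.Dict.mk mg).getD m []

-- accumulate, over the triples, the graph nodes of mentions related to h by a P-relation
def pvAcc (mg : List (String × List String)) (P : String → Bool) (h : String)
    (s : PySem.Set String) (t : List (String × String × String)) : PySem.Set String :=
  t.foldl (fun s x => if x.2.1 == h && P x.2.2 then PySem.Set.update s (pvNodes mg x.1) else s) s

def pvVal (mg : List (String × List String)) (t : List (String × String × String)) (h : String) :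
    List String × List String :=
  (pvAcc mg pvProRel h [] t, pvAcc mg (fun r => r == "contradicts") h [] t)

def pvM (mg : List (String × List String)) (t : List (String × String × String)) :
    List (String × List String × List String) :=
  (PySem.Set.ofList (t.map (fun y => y.2.1))).map (fun h => (h, pvVal mg t h))

-- B's inner loop body, on one flattened triple
def pvInner (mg : List (String × List String)) (d : PySem.Dict String (List String × List String))
    (x : String × String × String) : PySem.Dict String (List String × List String) :=
  let nodes := pvNodes mg x.1
  let d' := d.setdefault x.2.1 (PySem.Set.empty, PySem.Set.empty)
  let pc := d'.getD x.2.1 (PySem.Set.empty, PySem.Set.empty)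
  if pvProRel x.2.2 then d'.insert x.2.1 (PySem.Set.update pc.1 nodes, pc.2)
  else if x.2.2 == "contradicts" then d'.insert x.2.1 (pc.1, PySem.Set.update pc.2 nodes)
  else d'

-- A's per-hypothesis value (the body of A's loop over the hypothesis set)
def pvAval (mg : List (String × List String)) (mh : List (String × List (String × String)))
    (hypothesis : String) : List String × List String :=
  (((mh.filter (fun p =>
      match (PySem.Dict.mk p.2).get? hypothesis with
      | some r => pvProRel r
      | none => false)).map (fun p => p.1)).foldl
        (fun s m => PySem.Set.update s ((PySem.Dict.mk mg).getD m [])) PySem.Set.empty,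
   ((mh.filter (fun p =>
      match (PySem.Dict.mk p.2).get? hypothesis with
      | some r => r == "contradicts"
      | none => false)).map (fun p => p.1)).foldl
        (fun s m => PySem.Set.update s ((PySem.Dict.mk mg).getD m [])) PySem.Set.empty)

theorem pvAcc_append_singleton (mg : List (String × List String)) (P : String → Bool) (h : String)
    (s : PySem.Set String) (t : List (String × String × String)) (x : String × String × String) :
    pvAcc mg P h s (t ++ [x]) =
      if x.2.1 == h && P x.2.2 then PySem.Set.update (pvAcc mg P h s t) (pvNodes mg x.1)
      else pvAcc mg P h s t := by
  simp only [pvAcc, List.foldl_append, List.foldl_cons, List.foldl_nil]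

theorem pvAcc_append (mg : List (String × List String)) (P : String → Bool) (h : String)
    (s : PySem.Set String) (a b : List (String × String × String)) :
    pvAcc mg P h s (a ++ b) = pvAcc mg P h (pvAcc mg P h s a) b := by
  simp only [pvAcc, List.foldl_append]

theorem pvAcc_of_not_mem (mg : List (String × List String)) (P : String → Bool) {h : String}
    {t : List (String × String × String)} (hm : h ∉ t.map (fun y => y.2.1)) (s : PySem.Set String) :
    pvAcc mg P h s t = s := by
  induction t generalizing s with
  | nil => rfl
  | cons y ys ih =>
    simp only [List.map_cons, List.mem_cons, not_or] at hm
    have hb : (y.2.1 == h) = false := by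
      simp only [beq_eq_false_iff_ne, ne_eq]
      exact fun e => hm.1 e.symm
    simp only [pvAcc, List.foldl_cons, hb, Bool.false_and, Bool.false_eq_true, if_false]
    exact ih hm.2 s

theorem pv_pro_not_con {r : String} (hp : pvProRel r = true) : (r == "contradicts") = false := by
  have : r = "fully-relevant" ∨ r = "partially-relevant" := by
    simpa [pvProRel, Bool.or_eq_true, beq_iff_eq] using hp
  rcases this with rfl | rfl <;> decide

theorem pvVal_append_ne (mg : List (String × List String)) (t : List (String × String × String))
    {h h0 : String} (m r : String) (hne : h ≠ h0) :
    pvVal mg (t ++ [(m, h0, r)]) h = pvVal mg t h := by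
  have hb : (h0 == h) = false := by
    simp only [beq_eq_false_iff_ne, ne_eq]
    exact fun e => hne e.symm
  unfold pvVal
  rw [pvAcc_append_singleton, pvAcc_append_singleton]
  simp [hb]

theorem pvVal_append_self (mg : List (String × List String)) (t : List (String × String × String))
    (m h0 r : String) :
    pvVal mg (t ++ [(m, h0, r)]) h0 =
      (if pvProRel r then PySem.Set.update (pvVal mg t h0).1 (pvNodes mg m) else (pvVal mg t h0).1,
       if r == "contradicts" then PySem.Set.update (pvVal mg t h0).2 (pvNodes mg m) else (pvVal mg t h0).2) := by
  unfold pvVal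
  rw [pvAcc_append_singleton, pvAcc_append_singleton]
  simp

-- the single induction step of B's flattened loop
theorem pv_step (mg : List (String × List String)) (t : List (String × String × String))
    (m h0 r : String) (d : PySem.Dict String (List String × List String))
    (hd : d.items = pvM mg t) :
    (pvInner mg d (m, h0, r)).items = pvM mg (t ++ [(m, h0, r)]) := by
  have hkeys : d.keys = PySem.Set.ofList (t.map (fun y => y.2.1)) := by
    show d.items.map Prod.fst = _
    rw [hd]
    unfold pvM
    rw [List.map_map]
    exact List.map_id _
  have hndk : d.keys.Nodup := by rw [hkeys]; exact PySem.Set.nodup_ofList _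
  have hcont : ∀ h : String, d.contains h = decide (h ∈ t.map (fun y => y.2.1)) := by
    intro h
    rw [PySem.Dict.contains_eq_decide_mem_keys, hkeys]
    simp [PySem.Set.mem_ofList]
  have hgetD : ∀ h : String, d.getD h (PySem.Set.empty, PySem.Set.empty) = pvVal mg t h := by
    intro h
    by_cases hm : h ∈ t.map (fun y => y.2.1)
    · have hmem : (h, pvVal mg t h) ∈ d.items := by
        rw [hd]
        exact List.mem_map_of_mem ((PySem.Set.mem_ofList _ h).2 hm)
      exact PySem.Dict.getD_of_mem_items d hmem hndk _
    · have hc : d.contains h = false := by rw [hcont]; simpa using hm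
      have h1 : d.getD h (PySem.Set.empty, PySem.Set.empty) = (PySem.Set.empty, PySem.Set.empty) := by
        rw [PySem.Dict.getD_of_not_contains]; exact hc
      rw [h1]
      unfold pvVal
      rw [pvAcc_of_not_mem mg _ hm, pvAcc_of_not_mem mg _ hm]
      rfl
  by_cases hx : h0 ∈ t.map (fun y => y.2.1)
  · -- h0 already a known hypothesis: the key set is unchanged
    have hc0 : d.contains h0 = true := by rw [hcont]; simpa using hx
    have hK : PySem.Set.ofList ((t ++ [(m, h0, r)]).map (fun y => y.2.1))
        = PySem.Set.ofList (t.map (fun y => y.2.1)) := by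
      rw [List.map_append]
      simp only [List.map_cons, List.map_nil]
      rw [PySem.Set.ofList_append_singleton]
      exact PySem.Set.add_of_mem ((PySem.Set.mem_ofList _ _).2 hx)
    have hsd : d.setdefault h0 (PySem.Set.empty, PySem.Set.empty) = d := by
      rw [PySem.Dict.setdefault_of_contains]; exact hc0
    simp only [pvInner, hsd, hgetD h0]
    have hmap : ∀ V : List String × List String,
        (d.insert h0 V).items = (pvM mg t).map (fun (p : String × List String × List String) => if p.1 == h0 then (h0, V) else p) := by
      intro V
      rw [← hd]
      rw [PySem.Dict.items_insert_of_contains]; exact hc0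
    have hrepl : ∀ V : List String × List String,
        (pvM mg t).map (fun (p : String × List String × List String) => if p.1 == h0 then (h0, V) else p)
          = (PySem.Set.ofList (t.map (fun y => y.2.1))).map
              (fun h => if h == h0 then (h0, V) else (h, pvVal mg t h)) := by
      intro V
      unfold pvM
      rw [List.map_map]
      rfl
    have hgoal : ∀ V : List String × List String,
        (V = pvVal mg (t ++ [(m, h0, r)]) h0) →
        (pvM mg t).map (fun (p : String × List String × List String) => if p.1 == h0 then (h0, V) else p) = pvM mg (t ++ [(m, h0, r)]) := by
      intro V hV
      rw [hrepl]
      unfold pvM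
      rw [hK]
      apply List.map_congr_left
      intro h _
      by_cases hh : h = h0
      · subst hh
        simp only [beq_self_eq_true, if_true, hV]
      · have hb : (h == h0) = false := by simpa [beq_eq_false_iff_ne, ne_eq] using hh
        rw [hb]
        simp only [Bool.false_eq_true, if_false]
        rw [pvVal_append_ne mg t m r hh]
    by_cases hp : pvProRel r = true
    · rw [if_pos hp, hmap]
      apply hgoal
      rw [pvVal_append_self]
      simp [hp, pv_pro_not_con hp]
    · rw [if_neg (by simpa using hp)]
      by_cases hcon : (r == "contradicts") = true
      · rw [if_pos hcon, hmap]
        apply hgoal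
        rw [pvVal_append_self]
        simp [hp, hcon]
      · rw [if_neg (by simpa using hcon)]
        rw [hd]
        unfold pvM
        rw [hK]
        apply List.map_congr_left
        intro h _
        by_cases hh : h = h0
        · subst hh
          rw [pvVal_append_self]
          simp [hp, hcon]
        · rw [pvVal_append_ne mg t m r hh]
  · -- h0 is a new hypothesis: it is appended to the key set
    have hc0 : d.contains h0 = false := by rw [hcont]; simpa using hx
    have hKadd : PySem.Set.ofList ((t ++ [(m, h0, r)]).map (fun y => y.2.1))
        = PySem.Set.ofList (t.map (fun y => y.2.1)) ++ [h0] := by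
      rw [List.map_append]
      simp only [List.map_cons, List.map_nil]
      rw [PySem.Set.ofList_append_singleton]
      exact PySem.Set.add_of_not_mem (fun hmem => hx ((PySem.Set.mem_ofList _ _).1 hmem))
    have hsd : d.setdefault h0 (PySem.Set.empty, PySem.Set.empty)
        = d.insert h0 (PySem.Set.empty, PySem.Set.empty) := by
      rw [PySem.Dict.setdefault_of_not_contains]; exact hc0
    have hitems' : (d.insert h0 (PySem.Set.empty, PySem.Set.empty)).items
        = d.items ++ [(h0, (PySem.Set.empty, PySem.Set.empty))] := by
      rw [PySem.Dict.items_insert_of_not_contains]; exact hc0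
    have hcont' : (d.insert h0 (PySem.Set.empty, PySem.Set.empty)).contains h0 = true :=
      PySem.Dict.contains_insert_self _ _ _
    have hget' : (d.insert h0 (PySem.Set.empty, PySem.Set.empty)).getD h0 (PySem.Set.empty, PySem.Set.empty)
        = (PySem.Set.empty, PySem.Set.empty) := PySem.Dict.getD_insert_self _ _ _ _
    have hval0 : pvVal mg t h0 = ([], []) := by
      unfold pvVal
      rw [pvAcc_of_not_mem mg _ hx, pvAcc_of_not_mem mg _ hx]
    have hleft : ∀ V : List String × List String,
        (d.items ++ [(h0, (PySem.Set.empty, PySem.Set.empty))]).map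
            (fun (p : String × List String × List String) => if p.1 == h0 then (h0, V) else p)
          = pvM mg t ++ [(h0, V)] := by
      intro V
      rw [List.map_append]
      congr 1
      · rw [hd]
        unfold pvM
        rw [List.map_map]
        apply List.map_congr_left
        intro h hh
        have hne : h ≠ h0 := by
          intro e; exact hx ((PySem.Set.mem_ofList _ _).1 (e ▸ hh))
        have hb : (h == h0) = false := by simpa [beq_eq_false_iff_ne, ne_eq] using hne
        simp [Function.comp, hb]
      · simp
    have hright : pvM mg (t ++ [(m, h0, r)])
        = pvM mg t ++ [(h0, pvVal mg (t ++ [(m, h0, r)]) h0)] := by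
      unfold pvM
      rw [hKadd, List.map_append]
      congr 1
      apply List.map_congr_left
      intro h hh
      have hne : h ≠ h0 := by
        intro e; exact hx ((PySem.Set.mem_ofList _ _).1 (e ▸ hh))
      rw [pvVal_append_ne mg t m r hne]
    simp only [pvInner, hsd, hget']
    by_cases hp : pvProRel r = true
    · rw [if_pos hp]
      have : (d.insert h0 (PySem.Set.empty, PySem.Set.empty)).contains h0 = true := hcont'
      rw [PySem.Dict.items_insert_of_contains, hitems', hleft, hright]
      · congr 2
        rw [pvVal_append_self, hval0]
        simp [hp, pv_pro_not_con hp]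
      · exact hcont'
    · rw [if_neg (by simpa using hp)]
      by_cases hcon : (r == "contradicts") = true
      · rw [if_pos hcon]
        rw [PySem.Dict.items_insert_of_contains, hitems', hleft, hright]
        · congr 2
          rw [pvVal_append_self, hval0]
          simp [hp, hcon]
        · exact hcont'
      · rw [if_neg (by simpa using hcon)]
        rw [hitems', hright, hd]
        congr 2
        rw [pvVal_append_self, hval0]
        simp [hp, hcon]

theorem pv_b_flatten (mg : List (String × List String)) (mh : List (String × List (String × String)))
    (d : PySem.Dict String (List String × List String)) :
    mh.foldl (fun d p =>
      let nodes := (PySem.Dict.mk mg).getD p.1 []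
      p.2.foldl (fun d q =>
        let d' := d.setdefault q.1 (PySem.Set.empty, PySem.Set.empty)
        let pc := d'.getD q.1 (PySem.Set.empty, PySem.Set.empty)
        if pvProRel q.2 then d'.insert q.1 (PySem.Set.update pc.1 nodes, pc.2)
        else if q.2 == "contradicts" then d'.insert q.1 (pc.1, PySem.Set.update pc.2 nodes)
        else d') d) d
    = (pvTrips mh).foldl (pvInner mg) d := by
  induction mh generalizing d with
  | nil => rfl
  | cons p rest ih =>
    simp only [List.foldl_cons, pvTrips, List.flatMap_cons, List.foldl_append, List.foldl_map]
    rw [ih]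
    rfl

theorem pv_invariant (mg : List (String × List String)) (t : List (String × String × String)) :
    (t.foldl (pvInner mg) PySem.Dict.empty).items = pvM mg t := by
  induction t using List.reverseRecOn with
  | nil => rfl
  | append_singleton t x ih =>
    obtain ⟨m, h0, r⟩ := x
    rw [List.foldl_append, List.foldl_cons, List.foldl_nil]
    exact pv_step mg t m h0 r _ ih

-- A side: value of one mention's relation map under a nodup key list
theorem pv_hr_acc (mg : List (String × List String)) (P : String → Bool) (m : String)
    (hr : List (String × String)) (hnd : (hr.map Prod.fst).Nodup) (h : String) (s : PySem.Set String) :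
    pvAcc mg P h s (hr.map (fun q => (m, q.1, q.2)))
      = (match (PySem.Dict.mk hr).get? h with
         | some r => if P r then PySem.Set.update s (pvNodes mg m) else s
         | none => s) := by
  induction hr generalizing s with
  | nil => rfl
  | cons q rest ih =>
    obtain ⟨k, v⟩ := q
    simp only [List.map_cons, List.nodup_cons] at hnd
    rw [List.map_cons]
    simp only [pvAcc, List.foldl_cons]
    rw [PySem.Dict.get?_mk_cons]
    by_cases hqh : k = h
    · have hb : (k == h) = true := by simpa [beq_iff_eq] using hqh
      have hnm : h ∉ (rest.map (fun q => (m, q.1, q.2))).map (fun y => y.2.1) := by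
        simp only [List.map_map]
        simpa [Function.comp, hqh] using hnd.1
      by_cases hP : P v = true
      · simp only [hb, hP, Bool.true_and, eq_self_iff_true, if_true]
        exact pvAcc_of_not_mem mg P hnm _
      · have hPf : P v = false := Bool.eq_false_iff.mpr hP
        simp only [hb, hPf, Bool.true_and, eq_self_iff_true, if_true, Bool.false_eq_true, if_false]
        exact pvAcc_of_not_mem mg P hnm s
    · have hb : (k == h) = false := by simpa [beq_eq_false_iff_ne, ne_eq] using hqh
      simp only [hb, Bool.false_and, Bool.false_eq_true, if_false]
      exact ih hnd.2 s

theorem pv_filter_acc (mg : List (String × List String)) (P : String → Bool)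
    (mh : List (String × List (String × String)))
    (hpre : ∀ p ∈ mh, (p.2.map Prod.fst).Nodup) (h : String) :
    ∀ s : PySem.Set String,
    ((mh.filter (fun p =>
        match (PySem.Dict.mk p.2).get? h with
        | some r => P r
        | none => false)).map (fun p => p.1)).foldl
      (fun s m => PySem.Set.update s ((PySem.Dict.mk mg).getD m [])) s
    = pvAcc mg P h s (pvTrips mh) := by
  induction mh with
  | nil => intro s; rfl
  | cons p rest ih =>
    intro s
    have hpp := hpre p (by simp)
    have hrest : ∀ q ∈ rest, (q.2.map Prod.fst).Nodup :=
      fun q hq => hpre q (List.mem_cons_of_mem _ hq)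
    simp only [pvTrips] at *
    rw [List.flatMap_cons, pvAcc_append, pv_hr_acc mg P p.1 p.2 hpp h s]
    rw [List.filter_cons]
    cases hg : (PySem.Dict.mk p.2).get? h with
    | none =>
      simp only [hg]
      exact ih hrest s
    | some r =>
      simp only [hg]
      by_cases hP : P r = true
      · simp only [hP, if_true, List.map_cons, List.foldl_cons]
        exact ih hrest _
      · simp only [(by simpa using hP : P r = false), Bool.false_eq_true, if_false]
        exact ih hrest s

theorem pvAval_eq (mg : List (String × List String)) (mh : List (String × List (String × String)))
    (hpre : ∀ p ∈ mh, (p.2.map Prod.fst).Nodup) (h : String) :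
    pvAval mg mh h = pvVal mg (pvTrips mh) h := by
  unfold pvAval pvVal
  rw [pv_filter_acc mg pvProRel mh hpre h, pv_filter_acc mg (fun r => r == "contradicts") mh hpre h]
  rfl

theorem pv_hyps_eq (mh : List (String × List (String × String))) :
    ∀ s : PySem.Set String,
    mh.foldl (fun s p => PySem.Set.update s (p.2.map (fun q => q.1))) s
      = ((pvTrips mh).map (fun y => y.2.1)).foldl PySem.Set.add s := by
  induction mh with
  | nil => intro s; rfl
  | cons p rest ih =>
    intro s
    simp only [List.foldl_cons, pvTrips, List.flatMap_cons, List.map_append, List.map_map,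
      List.foldl_append]
    rw [ih]
    rfl

theorem pv_a_eq (mygraph : Int) (mh : List (String × List (String × String)))
    (mg : List (String × List String))
    (hpre : ∀ p ∈ mh, (p.2.map Prod.fst).Nodup) :
    determine_pro_and_con_evidence mygraph mh mg = pvM mg (pvTrips mh) := by
  have h1 : determine_pro_and_con_evidence mygraph mh mg =
      ((mh.foldl (fun s p => PySem.Set.update s (p.2.map (fun q => q.1))) PySem.Set.empty).foldl
        (fun d h => d.insert h (pvAval mg mh h)) PySem.Dict.empty).items := rfl
  rw [h1]
  have hK : (mh.foldl (fun s p => PySem.Set.update s (p.2.map (fun q => q.1))) PySem.Set.empty)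
      = PySem.Set.ofList ((pvTrips mh).map (fun y => y.2.1)) := by
    rw [pv_hyps_eq]
    exact (PySem.Set.ofList_eq_foldl _).symm
  rw [hK]
  have h2 : ((PySem.Set.ofList ((pvTrips mh).map (fun y => y.2.1))).foldl
      (fun d h => d.insert h (pvAval mg mh h)) PySem.Dict.empty).items
      = PySem.Dict.empty.items
        ++ (PySem.Set.ofList ((pvTrips mh).map (fun y => y.2.1))).map (fun h => (h, pvAval mg mh h)) := by
    apply PySem.Dict.items_foldl_insert_fresh
    · intro a _
      exact PySem.Dict.contains_empty _
    · simpa using PySem.Set.nodup_ofList ((pvTrips mh).map (fun y => y.2.1))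
  rw [h2]
  show [] ++ _ = _
  rw [List.nil_append]
  unfold pvM
  apply List.map_congr_left
  intro h _
  rw [pvAval_eq mg mh hpre h]

-- ===== VERDICT (by name: the statement is the Claim_ definition above) =====
theorem determine_pro_and_con_evidence_spec : Claim_equal_determine_pro_and_con_evidence := by
  intro mygraph mh mg _ hpre
  unfold Spec_determine_pro_and_con_evidence
  rw [pv_a_eq mygraph mh mg hpre]
  show pvM mg (pvTrips mh) = determine_pro_and_con_evidence_alt mygraph mh mg
  unfold determine_pro_and_con_evidence_alt
  rw [pv_b_flatten mg mh PySem.Dict.empty, pv_invariant]
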